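-- pv_equiv track=rewrite | github.com/kennedyCzar/SEMI-SUPERVISED-NAIVE-BAYES-FOR-TEXT-CLASSIFICATION | SCRIPTS/naive_bayes.py | review_features
-- ===== SOURCE A (Python) =====
-- def review_features(review, all_words):
--     #features = {}
--     features = all_words.copy()
--     #features["review"] = review
--     for word in str.split(review, " "):
--         if len(word) > 1:
--             if word in features:
--                 features[word] += 1
--             else:
--                 features[word] = 1
--     return features
-- ===== SOURCE B (Python) =====
-- def review_features(review, all_words):
--     # Count-by-query: no running tally at all. Each feature value is the base
--     # value plus the word's total occurrence count, computed directly with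
--     # list.count; new words are appended at their first occurrence.
--     long_words = [w for w in str.split(review, " ") if len(w) > 1]
--     features = {k: v + long_words.count(k) for k, v in all_words.items()}
--     for w in long_words:
--         if w not in features:
--             features[w] = long_words.count(w)
--     return features
-- ===== Notes on version B (the rewrite author's own statement) =====
-- stated objective: alternative
-- what changed: B removes A's running tally altogether: it computes each feature value by directly counting the word's occurrences in the split word list with list.count (a comprehension over all_words for existing keys, then new words appended at first occurrence), instead of A's incremental +1 updates to a dict while scanning the words.
import Mathlib
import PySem

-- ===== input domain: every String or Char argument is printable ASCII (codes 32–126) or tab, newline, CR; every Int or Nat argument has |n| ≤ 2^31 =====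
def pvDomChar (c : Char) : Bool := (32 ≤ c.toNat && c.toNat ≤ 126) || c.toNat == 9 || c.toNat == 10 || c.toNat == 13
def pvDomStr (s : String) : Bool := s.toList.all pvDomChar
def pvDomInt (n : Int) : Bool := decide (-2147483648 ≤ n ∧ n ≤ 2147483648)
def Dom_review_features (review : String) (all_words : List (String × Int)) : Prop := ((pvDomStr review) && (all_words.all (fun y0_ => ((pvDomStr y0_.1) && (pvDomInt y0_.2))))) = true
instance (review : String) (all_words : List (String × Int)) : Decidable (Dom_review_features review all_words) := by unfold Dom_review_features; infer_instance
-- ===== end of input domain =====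

-- B drops A's running tally entirely: every feature value is obtained by directly
-- counting the word's occurrences in the split word list (list.count), old keys by a
-- comprehension over all_words, new keys appended at their first occurrence.
-- Return value only; neither version mutates all_words.

-- ===== PORT A =====
def review_features (review : String) (all_words : List (String × Int)) : List (String × Int) :=
  let features := PySem.Dict.ofList all_words
  (((PySem.Str.split? review " ").getD []).foldl
    (fun d word =>
      if 1 < PySem.Str.len word then
        if d.contains word then d.insert word (d.getD word 0 + 1)
        else d.insert word 1
      else d)
    features).items

-- ===== PORT B =====
def review_features_alt (review : String) (all_words : List (String × Int)) : List (String × Int) :=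
  let long_words := ((PySem.Str.split? review " ").getD []).filter
    (fun w => decide (1 < PySem.Str.len w))
  let features := (PySem.Dict.ofList all_words).items.foldl
    (fun d p => d.insert p.1 (p.2 + (long_words.count p.1 : Int)))
    PySem.Dict.empty
  (long_words.foldl
    (fun d w => if d.contains w then d else d.insert w (long_words.count w : Int))
    features).items

-- ===== PRECONDITION & SPEC =====
def Spec_review_features (review : String) (all_words : List (String × Int)) (out : List (String × Int)) : Prop := out = review_features_alt review all_words
instance (review : String) (all_words : List (String × Int)) (out : List (String × Int)) : Decidable (Spec_review_features review all_words out) := by unfold Spec_review_features; infer_instance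

-- ===== CLAIM (what is proved, stated in full; the proofs are below) =====
def Claim_equal_review_features : Prop := ∀ (review : String) (all_words : List (String × Int)), Dom_review_features review all_words → Spec_review_features review all_words (review_features review all_words)

-- ===== LEMMAS AND PROOFS =====

-- A's two-branch update is the uniform "insert (getD + 1)" update.
theorem stepA_eq (d : PySem.Dict String Int) (w : String) :
    (if d.contains w then d.insert w (d.getD w 0 + 1) else d.insert w 1)
      = d.insert w (d.getD w 0 + 1) := by
  by_cases h : d.contains w = true
  · simp [h]
  · simp only [Bool.not_eq_true] at h
    rw [if_neg (by simp [h]), PySem.Dict.getD_of_not_contains _ _ h]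
    norm_num

-- A's loop equals the uniform update fold over the filtered word list
theorem fold_stepA_eq (l : List String) (d : PySem.Dict String Int) :
    l.foldl
      (fun d word =>
        if 1 < PySem.Str.len word then
          if d.contains word then d.insert word (d.getD word 0 + 1)
          else d.insert word 1
        else d) d
      = (l.filter (fun w => decide (1 < PySem.Str.len w))).foldl
          (fun d w => d.insert w (d.getD w 0 + 1)) d := by
  induction l generalizing d with
  | nil => rfl
  | cons x xs ih =>
    rw [List.foldl_cons, List.filter_cons]
    by_cases h : 1 < PySem.Str.len x
    · rw [if_pos h, stepA_eq, if_pos (by simpa using h), List.foldl_cons, ih]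
    · rw [if_neg h, if_neg (by simpa using h), ih]

-- lookup after a fold inserting f k at each key of a list
theorem getD_foldl_insert_fun (ks : List String) (f : String → Int)
    (d0 : PySem.Dict String Int) (k : String) :
    (ks.foldl (fun d x => d.insert x (f x)) d0).getD k 0
      = if k ∈ ks then f k else d0.getD k 0 := by
  induction ks generalizing d0 with
  | nil => simp
  | cons x xs ih =>
    rw [List.foldl_cons, ih]
    by_cases hk : k ∈ xs
    · simp [hk]
    · by_cases hkx : k = x
      · subst hkx; simp [hk]
      · simp [hk, hkx, PySem.Dict.getD_insert]

-- keys of B's guarded first-occurrence insertion loop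
theorem keys_foldl_cond (l : List String) (c : String → Int)
    (d : PySem.Dict String Int) :
    (l.foldl (fun d w => if d.contains w then d else d.insert w (c w)) d).keys
      = PySem.Set.update d.keys l := by
  induction l generalizing d with
  | nil => rfl
  | cons x xs ih =>
    rw [List.foldl_cons, PySem.Set.update_cons]
    by_cases h : d.contains x = true
    · rw [if_pos h, ih,
          PySem.Set.add_of_mem ((PySem.Dict.contains_iff_mem_keys _ _).mp h)]
    · simp only [Bool.not_eq_true] at h
      rw [if_neg (by simp [h]), ih,
          PySem.Dict.keys_insert_of_not_contains _ _ h,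
          PySem.Set.add_of_not_mem
            (fun hm => by simp [(PySem.Dict.contains_iff_mem_keys _ _).mpr hm] at h)]

-- lookup after B's guarded first-occurrence insertion loop
theorem getD_foldl_cond (l : List String) (c : String → Int)
    (d : PySem.Dict String Int) (k : String) :
    (l.foldl (fun d w => if d.contains w then d else d.insert w (c w)) d).getD k 0
      = if d.contains k then d.getD k 0 else if k ∈ l then c k else 0 := by
  induction l generalizing d with
  | nil =>
    by_cases hk : d.contains k = true
    · simp [hk]
    · simp only [Bool.not_eq_true] at hk
      simp [hk, PySem.Dict.getD_of_not_contains _ _ hk]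
  | cons x xs ih =>
    rw [List.foldl_cons]
    by_cases h : d.contains x = true
    · rw [if_pos h, ih]
      by_cases hk : d.contains k = true
      · simp [hk]
      · have hkx : k ≠ x := fun he => by rw [he] at hk; exact hk h
        simp [hk, hkx]
    · simp only [Bool.not_eq_true] at h
      rw [if_neg (by simp [h]), ih]
      by_cases hkx : k = x
      · subst hkx
        simp [h]
      · rw [PySem.Dict.contains_insert, PySem.Dict.getD_insert, if_neg hkx]
        have : (k == x) = false := by simp [hkx]
        simp only [this, Bool.false_or]
        by_cases hk : d.contains k = true
        · simp [hk]
        · simp only [Bool.not_eq_true] at hk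
          simp [hk, hkx]

-- ===== VERDICT (by name: the statement is the Claim_ definition above) =====
theorem review_features_spec : Claim_equal_review_features := by
  intro review all_words _
  unfold Spec_review_features review_features review_features_alt
  dsimp only
  rw [fold_stepA_eq]
  set lw := (((PySem.Str.split? review " ").getD []).filter
      (fun w => decide (1 < PySem.Str.len w))) with hlw
  set base := PySem.Dict.ofList all_words with hbase
  have hnd : base.keys.Nodup := PySem.Dict.nodup_keys_ofList all_words
  -- B's first pass rebuilt as a fold over base's keys
  have hitems : base.items = base.keys.map (fun k => (k, base.getD k 0)) :=
    PySem.Dict.items_eq_map_keys base hnd 0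
  have hf1 : base.items.foldl
      (fun d p => d.insert p.1 (p.2 + (lw.count p.1 : Int))) PySem.Dict.empty
      = base.keys.foldl
          (fun d k => d.insert k (base.getD k 0 + (lw.count k : Int)))
          PySem.Dict.empty := by
    rw [hitems, List.foldl_map]
  set f1 := base.items.foldl
      (fun d p => d.insert p.1 (p.2 + (lw.count p.1 : Int))) PySem.Dict.empty with hf1def
  have hf1keys : f1.keys = base.keys := by
    rw [hf1, PySem.Dict.keys_foldl_insert, PySem.Dict.keys_empty,
        PySem.Set.update_nil_left, PySem.Set.ofList_eq_self_of_nodup _ hnd]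
  have hf1getD : ∀ k, f1.getD k 0
      = if k ∈ base.keys then base.getD k 0 + (lw.count k : Int) else 0 := by
    intro k
    rw [hf1, getD_foldl_insert_fun]
    simp
  -- keys of the two result dicts agree
  set A := lw.foldl (fun d w => d.insert w (d.getD w 0 + 1)) base with hA
  set B := lw.foldl
      (fun d w => if d.contains w then d else d.insert w (lw.count w : Int)) f1 with hB
  have hAkeys : A.keys = PySem.Set.update base.keys lw := by
    rw [hA, PySem.Dict.keys_foldl_insert]
  have hBkeys : B.keys = PySem.Set.update base.keys lw := by
    rw [hB, keys_foldl_cond, hf1keys]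
  have hAnd : A.keys.Nodup := by rw [hAkeys]; exact PySem.Set.nodup_update _ _ hnd
  have hBnd : B.keys.Nodup := by rw [hBkeys]; exact PySem.Set.nodup_update _ _ hnd
  rw [PySem.Dict.items_eq_map_keys A hAnd 0, PySem.Dict.items_eq_map_keys B hBnd 0,
      hAkeys, hBkeys]
  apply List.map_congr_left
  intro k hk
  have hAv : A.getD k 0 = base.getD k 0 + (lw.count k : Int) := by
    rw [hA]; exact PySem.Dict.getD_foldl_insert_add_one _ _ _
  have hBv : B.getD k 0
      = if f1.contains k then f1.getD k 0 else if k ∈ lw then (lw.count k : Int) else 0 := by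
    rw [hB]; exact getD_foldl_cond _ _ _ _
  have hcont : f1.contains k = decide (k ∈ base.keys) := by
    rw [PySem.Dict.contains_eq_decide_mem_keys, hf1keys]
  rw [hAv, hBv, hcont, hf1getD]
  by_cases hkb : k ∈ base.keys
  · simp [hkb]
  · have hbc : base.contains k = false := by
      rw [PySem.Dict.contains_eq_decide_mem_keys]; simp [hkb]
    have hb0 : base.getD k 0 = 0 := PySem.Dict.getD_of_not_contains _ _ hbc
    have hkl : k ∈ lw := by
      rcases (PySem.Set.mem_update _ _ _).mp hk with h | h
      · exact absurd h hkb
      · exact h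
    simp [hkb, hkl, hb0]
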